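-- pv_equiv track=rewrite | github.com/ScarBoltdroid/BCD | tools.py | check_draft
-- ===== SOURCE A (Python) =====
-- def check_draft(group_name, draft_track):
--     """
--     Checks the draft tracking dictionary to determine the next pick's details.
--
--     Args:
--         draft_track (dict): A dictionary with the structure
--                             {group: {round: {pick: [rider_url, player]}}}.
--
--     Returns:
--         tuple: (current_round, current_pick, player_to_pick)
--                or None if the dictionary is empty (no picks made).
--     """
--
--
--
--     # Assuming there's only one group based on the example structure,
--     # we extract the inner draft details.
--     if not draft_track:
--         return None # Handle case of empty draft_track
--
--     draft_rounds = draft_track[group_name]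
--
--     # Find the highest round that has been started
--     # Note: Keys are strings, so we convert to int for comparison
--     rounds = sorted([int(r) for r in draft_rounds.keys()])
--
--     for round in rounds:
--         for pick in sorted([int(r) for r in draft_rounds[str(round)].keys()]):
--             if draft_rounds[str(round)][str(pick)][0] == "":
--                 next_round = str(round)
--                 next_pick = str(pick)
--                 next_player = draft_rounds[str(round)][str(pick)][1]
--                 status = "ongoing"
--                 return next_round, next_pick, next_player, status
--
--     return "1", "1", "player", "finished"
-- ===== SOURCE B (Python) =====
-- def check_draft(group_name, draft_track):
--     if not draft_track:
--         return None
--     slots = [(int(r), int(p), r, p, slot)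
--              for r, picks in draft_track[group_name].items()
--              for p, slot in picks.items()]
--     slots.sort(key=lambda t: (t[0], t[1]))
--     for _, _, r, p, slot in slots:
--         if slot[0] == "":
--             return r, p, slot[1], "ongoing"
--     return "1", "1", "player", "finished"
-- ===== Notes on version B (the rewrite author's own statement) =====
-- stated objective: alternative
-- what changed: Replaces the nested sorted-round/sorted-pick loops with dict re-lookups by str(int(key)) with one flatten of all (round,pick,slot) entries into a single list, one combined sort by (int(round), int(pick)), and one linear scan for the first empty slot.
import Mathlib
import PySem

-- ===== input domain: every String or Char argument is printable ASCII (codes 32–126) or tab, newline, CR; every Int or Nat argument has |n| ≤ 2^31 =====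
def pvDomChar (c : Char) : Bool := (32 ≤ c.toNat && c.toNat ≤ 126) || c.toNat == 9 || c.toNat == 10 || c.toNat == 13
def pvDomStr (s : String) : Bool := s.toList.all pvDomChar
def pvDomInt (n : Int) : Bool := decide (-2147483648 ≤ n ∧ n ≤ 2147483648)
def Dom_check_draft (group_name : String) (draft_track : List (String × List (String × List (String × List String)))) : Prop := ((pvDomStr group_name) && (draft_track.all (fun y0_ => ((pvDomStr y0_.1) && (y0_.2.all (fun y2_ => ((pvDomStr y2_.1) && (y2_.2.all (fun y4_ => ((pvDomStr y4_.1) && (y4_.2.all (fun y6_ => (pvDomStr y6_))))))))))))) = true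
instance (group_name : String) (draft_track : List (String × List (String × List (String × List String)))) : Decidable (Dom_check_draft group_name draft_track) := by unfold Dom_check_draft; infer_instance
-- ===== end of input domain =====

-- B replaces A's nested sorted-round/sorted-pick loops (with str(int(key)) dict re-lookups) by one
-- flatten + one combined (int(round), int(pick)) sort + one linear scan; equal on Pre_ (alternative).


-- int(k) with a junk default 0; the default is only reached outside Pre_ (Python raises ValueError there)
def pvIK (k : String) : Int := (PySem.Int.ofStr? k).getD 0

-- ===== PORT A =====
-- inner loop 'for pick in sorted([int(r) for r in draft_rounds[str(round)].keys()])';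
-- 'none' on the KeyError/IndexError paths (all outside Pre_)
def check_draft_inner (rounds : List (String × List (String × List String))) (r : Int) :
    List Int → Option (String × String × String × String)
  | [] => none
  | p :: ps =>
    match (PySem.Dict.mk rounds).get? (PySem.Int.toStr r) with
    | none => none
    | some picks =>
      match (PySem.Dict.mk picks).get? (PySem.Int.toStr p) with
      | none => none
      | some slot =>
        match PySem.List.pyGet? slot 0 with
        | none => none
        | some s0 =>
          if s0 = "" then
            match PySem.List.pyGet? slot 1 with
            | none => none
            | some player => some (PySem.Int.toStr r, PySem.Int.toStr p, player, "ongoing")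
          else check_draft_inner rounds r ps

def check_draft_outer (rounds : List (String × List (String × List String))) :
    List Int → Option (String × String × String × String)
  | [] => some ("1", "1", "player", "finished")
  | r :: rs =>
    match (PySem.Dict.mk rounds).get? (PySem.Int.toStr r) with
    | none => none
    | some picks =>
      match check_draft_inner rounds r
          (PySem.List.sorted ((PySem.Dict.mk picks).keys.map pvIK) (fun x => x) false) with
      | some res => some res
      | none => check_draft_outer rounds rs

def check_draft (group_name : String) (draft_track : List (String × List (String × List (String × List String)))) : Option (String × String × String × String) :=
  if draft_track = [] then none
  else
    match (PySem.Dict.mk draft_track).get? group_name with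
    | none => none   -- KeyError (outside Pre_)
    | some rounds =>
      check_draft_outer rounds
        (PySem.List.sorted ((PySem.Dict.mk rounds).keys.map pvIK) (fun x => x) false)

-- ===== PORT B =====
def check_draft_alt_scan : List (Int × Int × String × String × List String) → Option (String × String × String × String)
  | [] => some ("1", "1", "player", "finished")
  | t :: rest =>
    if PySem.List.pyGet? t.2.2.2.2 0 = some "" then
      (PySem.List.pyGet? t.2.2.2.2 1).map (fun pl => (t.2.2.1, t.2.2.2.1, pl, "ongoing"))
    else check_draft_alt_scan rest

def check_draft_alt (group_name : String) (draft_track : List (String × List (String × List (String × List String)))) : Option (String × String × String × String) :=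
  if draft_track = [] then none
  else
    match (PySem.Dict.mk draft_track).get? group_name with
    | none => none   -- KeyError (outside Pre_)
    | some rounds =>
      let slots := rounds.flatMap (fun rp => rp.2.map (fun ps => (pvIK rp.1, pvIK ps.1, rp.1, ps.1, ps.2)))
      check_draft_alt_scan (PySem.List.sorted2 slots (fun t => t.1) (fun t => t.2.1) false)

-- ===== PRECONDITION & SPEC =====
-- k is the canonical decimal string of an integer (k == str(int(k)))
def pvCanon (k : String) : Prop := PySem.Int.ofStr? k = some (pvIK k) ∧ PySem.Int.toStr (pvIK k) = k
def pvGoodSlot (s : List String) : Prop := s ≠ [] ∧ (s.head? = some "" → 2 ≤ s.length)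
def pvGoodRounds (rounds : List (String × List (String × List String))) : Prop :=
  (rounds.map Prod.fst).Nodup ∧
  ∀ rp ∈ rounds, pvCanon rp.1 ∧ (rp.2.map Prod.fst).Nodup ∧ ∀ ps ∈ rp.2, pvCanon ps.1 ∧ pvGoodSlot ps.2

-- Pre_ excludes the inputs on which A raises (missing group name → KeyError, non-integer round/pick
-- keys → ValueError, empty slot lists or one-element slots opening with "" → IndexError) and the
-- degenerate encodings A only survives by accident: non-canonical integer keys ('01' vs '1'), where
-- A's str(int(key)) re-lookup can hit a different entry than the one being iterated, and duplicate
-- keys inside one level, which cannot occur in a real Python dict.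
def Pre_check_draft (group_name : String) (draft_track : List (String × List (String × List (String × List String)))) : Prop :=
  draft_track ≠ [] →
    ((PySem.Dict.mk draft_track).get? group_name).isSome = true ∧
    pvGoodRounds (((PySem.Dict.mk draft_track).get? group_name).getD [])
instance (group_name : String) (draft_track : List (String × List (String × List (String × List String)))) : Decidable (Pre_check_draft group_name draft_track) := by unfold Pre_check_draft pvGoodRounds pvCanon pvGoodSlot; infer_instance

def pvWitness_check_draft : String × (List (String × List (String × List (String × List String)))) :=
  ("g", [("g", [("1", [("1", ["", "alice"]), ("2", ["r1", "bob"])]), ("2", [("1", ["", "carol"])])])])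

def Spec_check_draft (group_name : String) (draft_track : List (String × List (String × List (String × List String)))) (out : Option (String × String × String × String)) : Prop := out = check_draft_alt group_name draft_track
instance (group_name : String) (draft_track : List (String × List (String × List (String × List String)))) (out : Option (String × String × String × String)) : Decidable (Spec_check_draft group_name draft_track out) := by unfold Spec_check_draft; infer_instance

-- ===== CLAIM (what is proved, stated in full; the proofs are below) =====
def Claim_equal_check_draft : Prop := ∀ (group_name : String) (draft_track : List (String × List (String × List (String × List String)))), Dom_check_draft group_name draft_track → Pre_check_draft group_name draft_track → Spec_check_draft group_name draft_track (check_draft group_name draft_track)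

-- ===== LEMMAS AND PROOFS =====

-- the lexicographic 'before' function that sorted2 … (·.1) (·.2.1) false inserts with
def pvLex (a b : Int × Int × String × String × List String) : Bool :=
  decide (a.1 < b.1) || (!decide (b.1 < a.1) && decide (a.2.1 < b.2.1))

-- ghost scan over (round_key, pick_key, slot) triples: 'none' = no empty slot found
def pvPart : List (String × String × List String) → Option (String × String × String × String)
  | [] => none
  | (r, p, slot) :: rest =>
    if PySem.List.pyGet? slot 0 = some "" then
      (PySem.List.pyGet? slot 1).map (fun pl => (r, p, pl, "ongoing"))
    else pvPart rest

def pvAdd (e : String × String × List String) : Int × Int × String × String × List String :=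
  (pvIK e.1, pvIK e.2.1, e.1, e.2.1, e.2.2)

def pvBlock (rp : String × List (String × List String)) : List (String × String × List String) :=
  (PySem.List.sorted rp.2 (fun ps => pvIK ps.1) false).map (fun ps => (rp.1, ps.1, ps.2))

def pvKey2 (t : Int × Int × String × String × List String) : Int × Int := (t.1, t.2.1)

lemma pvLex_trans {a b c : Int × Int × String × String × List String}
    (h1 : pvLex a b = true) (h2 : pvLex b c = true) : pvLex a c = true := by
  simp only [pvLex, Bool.or_eq_true, Bool.and_eq_true, Bool.not_eq_eq_eq_not, Bool.not_true,
    decide_eq_true_eq, decide_eq_false_iff_not] at *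
  rcases h1 with h1 | ⟨h1a, h1b⟩ <;> rcases h2 with h2 | ⟨h2a, h2b⟩
  · exact Or.inl (h1.trans h2)
  · exact Or.inl (lt_of_lt_of_le h1 (le_of_not_gt h2a))
  · exact Or.inl (lt_of_le_of_lt (le_of_not_gt h1a) h2)
  · exact Or.inr ⟨fun h => h2a (lt_of_lt_of_le h (le_of_not_gt h1a)), h1b.trans h2b⟩

lemma pvLex_asym {a b : Int × Int × String × String × List String}
    (h1 : pvLex a b = true) (h2 : pvLex b a = true) : False := by
  simp only [pvLex, Bool.or_eq_true, Bool.and_eq_true, Bool.not_eq_eq_eq_not, Bool.not_true,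
    decide_eq_true_eq, decide_eq_false_iff_not] at *
  rcases h1 with h1 | ⟨h1a, h1b⟩ <;> rcases h2 with h2 | ⟨h2a, h2b⟩
  · exact absurd (h1.trans h2) (lt_irrefl _)
  · exact h2a h1
  · exact h1a h2
  · exact absurd (h1b.trans h2b) (lt_irrefl _)

lemma pvLex_total {a b : Int × Int × String × String × List String}
    (h : pvKey2 a ≠ pvKey2 b) : pvLex a b = true ∨ pvLex b a = true := by
  simp only [pvLex, Bool.or_eq_true, Bool.and_eq_true, Bool.not_eq_eq_eq_not, Bool.not_true,
    decide_eq_true_eq, decide_eq_false_iff_not]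
  rcases lt_trichotomy a.1 b.1 with h1 | h1 | h1
  · exact Or.inl (Or.inl h1)
  · rcases lt_trichotomy a.2.1 b.2.1 with h2 | h2 | h2
    · exact Or.inl (Or.inr ⟨by omega, h2⟩)
    · exact absurd (by simp only [pvKey2, Prod.mk.injEq]; exact ⟨h1, h2⟩) h
    · exact Or.inr (Or.inr ⟨by omega, h2⟩)
  · exact Or.inr (Or.inl h1)

lemma pvLex_ne {a b : Int × Int × String × String × List String}
    (h : pvLex a b = true) : pvKey2 a ≠ pvKey2 b := by
  intro he
  simp only [pvKey2, Prod.mk.injEq] at he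
  simp only [pvLex, Bool.or_eq_true, Bool.and_eq_true, decide_eq_true_eq] at h
  rcases h with h | ⟨_, h⟩ <;> omega

lemma insertBy_pvLex_pairwise (x : Int × Int × String × String × List String)
    (ys : List (Int × Int × String × String × List String))
    (hys : ys.Pairwise (fun a b => pvLex a b = true))
    (htot : ∀ y ∈ ys, pvLex x y = true ∨ pvLex y x = true) :
    (PySem.List.insertBy pvLex x ys).Pairwise (fun a b => pvLex a b = true) := by
  induction ys with
  | nil => simp [PySem.List.insertBy]
  | cons y t ih =>
    rw [List.pairwise_cons] at hys
    by_cases hxy : pvLex x y = true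
    · have : PySem.List.insertBy pvLex x (y :: t) = x :: y :: t := by
        simp [PySem.List.insertBy, hxy]
      rw [this, List.pairwise_cons]
      refine ⟨?_, List.pairwise_cons.mpr hys⟩
      intro z hz
      rcases List.mem_cons.mp hz with rfl | hz
      · exact hxy
      · exact pvLex_trans hxy (hys.1 z hz)
    · have : PySem.List.insertBy pvLex x (y :: t) = y :: PySem.List.insertBy pvLex x t := by
        simp [PySem.List.insertBy, hxy]
      rw [this, List.pairwise_cons]
      constructor
      · intro z hz
        rcases (PySem.List.insertBy_mem_iff pvLex x z t).mp hz with rfl | hz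
        · rcases htot y (by simp) with h | h
          · exact absurd h hxy
          · exact h
        · exact hys.1 z hz
      · exact ih hys.2 (fun y hy => htot y (by simp [hy]))

lemma foldl_insertBy_pvLex (xs acc : List (Int × Int × String × String × List String))
    (h1 : acc.Pairwise (fun a b => pvLex a b = true))
    (hnd : ((acc ++ xs).map pvKey2).Nodup) :
    (xs.foldl (fun a x => PySem.List.insertBy pvLex x a) acc).Pairwise (fun a b => pvLex a b = true) ∧
    (xs.foldl (fun a x => PySem.List.insertBy pvLex x a) acc).Perm (acc ++ xs) := by
  induction xs generalizing acc with
  | nil => exact ⟨h1, by simp⟩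
  | cons x t ih =>
    simp only [List.foldl_cons]
    have hpins : (PySem.List.insertBy pvLex x acc).Perm (x :: acc) :=
      PySem.List.insertBy_perm pvLex x acc
    have hstep : (PySem.List.insertBy pvLex x acc ++ t).Perm (acc ++ x :: t) := by
      refine (hpins.append_right t).trans ?_
      rw [List.cons_append]
      exact List.perm_middle.symm
    have hxacc : ∀ y ∈ acc, pvKey2 x ≠ pvKey2 y := by
      intro y hy he
      have hx : pvKey2 x ∈ (acc.map pvKey2) := he ▸ List.mem_map_of_mem hy
      rw [List.map_append, List.nodup_append] at hnd
      have hx2 : pvKey2 x ∈ List.map pvKey2 (x :: t) := by simp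
      exact hnd.2.2 (pvKey2 x) hx (pvKey2 x) hx2 rfl
    have h1' : (PySem.List.insertBy pvLex x acc).Pairwise (fun a b => pvLex a b = true) :=
      insertBy_pvLex_pairwise x acc h1 (fun y hy => pvLex_total (hxacc y hy))
    have hnd' : ((PySem.List.insertBy pvLex x acc ++ t).map pvKey2).Nodup :=
      ((hstep.map pvKey2).nodup_iff).mpr hnd
    obtain ⟨hp, hq⟩ := ih (PySem.List.insertBy pvLex x acc) h1' hnd'
    exact ⟨hp, hq.trans hstep⟩

lemma sorted2_eq_of_pvLex (xs ys : List (Int × Int × String × String × List String))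
    (hperm : ys.Perm xs) (hys : ys.Pairwise (fun a b => pvLex a b = true)) :
    PySem.List.sorted2 xs (fun t => t.1) (fun t => t.2.1) false = ys := by
  have hdef : PySem.List.sorted2 xs (fun t => t.1) (fun t => t.2.1) false =
      xs.foldl (fun a x => PySem.List.insertBy pvLex x a) [] := rfl
  have hndys : ((ys.map pvKey2)).Nodup := by
    rw [List.nodup_iff_pairwise_ne, List.pairwise_map]
    exact hys.imp (fun h => pvLex_ne h)
  have hnd : ((([] : List _) ++ xs).map pvKey2).Nodup := by
    simpa using (hperm.map pvKey2).nodup_iff.mp hndys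
  obtain ⟨hp, hq⟩ := foldl_insertBy_pvLex xs [] (by simp) hnd
  rw [hdef]
  refine List.Perm.eq_of_pairwise ?_ hp hys (by simpa using hq.trans hperm.symm)
  intro a b _ _ h1 h2
  exact absurd (pvLex_asym h1 h2) (fun h => h)

lemma pairwise_lt_of_le_nodup {l : List Int} (h1 : l.Pairwise (· ≤ ·)) (h2 : l.Nodup) :
    l.Pairwise (· < ·) :=
  (h1.and h2).imp (fun h => lt_of_le_of_ne h.1 h.2)

-- sorted([key(x) for x in l]) = [key(x) for x in sorted(l, key=key)] when keys are distinct
lemma sorted_map_id {α : Type} (l : List α) (key : α → Int) (h : (l.map key).Nodup) :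
    PySem.List.sorted (l.map key) (fun x => x) false = (PySem.List.sorted l key false).map key := by
  apply PySem.List.sorted_eq_of_perm_of_pairwise_lt
  · exact (PySem.List.sorted_perm l key false).map key
  · exact pairwise_lt_of_le_nodup (PySem.List.sorted_map_key_pairwise l key)
      (((PySem.List.sorted_perm l key false).map key).nodup_iff.mpr h)

-- canonical distinct string keys have distinct int values
lemma nodup_map_pvIK {α : Type} (l : List α) (f : α → String)
    (hnd : (l.map f).Nodup) (hc : ∀ x ∈ l, pvCanon (f x)) :
    (l.map (fun x => pvIK (f x))).Nodup := by
  have : ((l.map (fun x => pvIK (f x))).map PySem.Int.toStr) = l.map f := by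
    rw [List.map_map]
    exact List.map_congr_left (fun x hx => (hc x hx).2)
  exact (this ▸ hnd).of_map

lemma goodSlot_shape {slot : List String} (hg : pvGoodSlot slot)
    (h : PySem.List.pyGet? slot 0 = some "") :
    ∃ s1 rest, slot = "" :: s1 :: rest := by
  obtain ⟨s0, srest, rfl⟩ : ∃ s0 srest, slot = s0 :: srest := by
    cases slot with
    | nil => exact absurd rfl hg.1
    | cons a b => exact ⟨a, b, rfl⟩
  have hs0 : s0 = "" := by
    simpa [PySem.List.pyGet?, PySem.List.pyIdx?] using h
  subst hs0
  have hlen : 2 ≤ (List.length (("" : String) :: srest)) := hg.2 (by simp)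
  cases srest with
  | nil => simp at hlen
  | cons s1 rest => exact ⟨s1, rest, rfl⟩

lemma pvPart_append (u v : List (String × String × List String))
    (hg : ∀ e ∈ u, pvGoodSlot e.2.2) :
    pvPart (u ++ v) = (pvPart u).or (pvPart v) := by
  induction u with
  | nil => simp [pvPart]
  | cons e t ih =>
    obtain ⟨r, p, slot⟩ := e
    simp only [List.cons_append, pvPart]
    split_ifs with h
    · obtain ⟨s1, rest, rfl⟩ := goodSlot_shape (hg (r, p, slot) (by simp)) h
      simp [PySem.List.pyGet?, PySem.List.pyIdx?, Option.or]
    · exact ih (fun e he => hg e (by simp [he]))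

lemma altScan_map (l : List (String × String × List String))
    (hg : ∀ e ∈ l, pvGoodSlot e.2.2) :
    check_draft_alt_scan (l.map pvAdd) = (pvPart l).or (some ("1", "1", "player", "finished")) := by
  induction l with
  | nil => simp [check_draft_alt_scan, pvPart]
  | cons e t ih =>
    obtain ⟨r, p, slot⟩ := e
    simp only [List.map_cons, check_draft_alt_scan, pvAdd, pvPart]
    split_ifs with h
    · obtain ⟨s1, rest, rfl⟩ := goodSlot_shape (hg (r, p, slot) (by simp)) h
      simp [PySem.List.pyGet?, PySem.List.pyIdx?, Option.or]
    · exact ih (fun e he => hg e (by simp [he]))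

-- under canonical nodup keys the dict lookup by str(int(key)) finds the iterated entry
lemma lookup_canon {ν : Type} (l : List (String × ν)) (k : String) (v : ν)
    (hmem : (k, v) ∈ l) (hnd : (l.map Prod.fst).Nodup) (hc : pvCanon k) :
    (PySem.Dict.mk l).get? (PySem.Int.toStr (pvIK k)) = some v := by
  rw [hc.2]
  exact PySem.Dict.get?_of_mem_items (PySem.Dict.mk l) hmem (by simpa [PySem.Dict.keys_mk] using hnd)

lemma inner_go (rounds : List (String × List (String × List String)))
    (rp : String × List (String × List String)) (l : List (String × List String))
    (hrnd : (rounds.map Prod.fst).Nodup) (hrmem : rp ∈ rounds) (hrc : pvCanon rp.1)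
    (hpnd : (rp.2.map Prod.fst).Nodup)
    (hl : ∀ ps ∈ l, ps ∈ rp.2 ∧ pvCanon ps.1 ∧ pvGoodSlot ps.2) :
    check_draft_inner rounds (pvIK rp.1) (l.map (fun ps => pvIK ps.1)) =
      pvPart (l.map (fun ps => (rp.1, ps.1, ps.2))) := by
  induction l with
  | nil => simp [check_draft_inner, pvPart]
  | cons e t ih =>
    obtain ⟨p, slot⟩ := e
    obtain ⟨hmem, hc, hslot⟩ := hl (p, slot) (by simp)
    have h1 : (PySem.Dict.mk rounds).get? (PySem.Int.toStr (pvIK rp.1)) = some rp.2 := by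
      have : (rp.1, rp.2) ∈ rounds := by simpa using hrmem
      exact lookup_canon rounds rp.1 rp.2 this hrnd hrc
    have h2 : (PySem.Dict.mk rp.2).get? (PySem.Int.toStr (pvIK p)) = some slot :=
      lookup_canon rp.2 p slot hmem hpnd hc
    obtain ⟨s0, srest, rfl⟩ : ∃ s0 srest, slot = s0 :: srest := by
      cases slot with
      | nil => exact absurd rfl hslot.1
      | cons a b => exact ⟨a, b, rfl⟩
    have hget0 : PySem.List.pyGet? (s0 :: srest) 0 = some s0 := by
      simp [PySem.List.pyGet?, PySem.List.pyIdx?]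
    simp only [List.map_cons, check_draft_inner, h1, h2, hget0, pvPart]
    by_cases hs : s0 = ""
    · simp only [hs]
      rw [hrc.2, hc.2]
      cases PySem.List.pyGet? (("" : String) :: srest) 1 <;> simp
    · simp only [if_neg hs]
      rw [if_neg (by simpa using hs)]
      exact ih (fun ps hps => hl ps (by simp [hps]))

lemma outer_go (rounds : List (String × List (String × List String)))
    (l : List (String × List (String × List String)))
    (hrnd : (rounds.map Prod.fst).Nodup)
    (hl : ∀ rp ∈ l, rp ∈ rounds ∧ pvCanon rp.1 ∧ (rp.2.map Prod.fst).Nodup ∧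
          ∀ ps ∈ rp.2, pvCanon ps.1 ∧ pvGoodSlot ps.2) :
    check_draft_outer rounds (l.map (fun rp => pvIK rp.1)) =
      (pvPart (l.flatMap pvBlock)).or (some ("1", "1", "player", "finished")) := by
  induction l with
  | nil => simp [check_draft_outer, pvPart]
  | cons rp t ih =>
    obtain ⟨hrmem, hrc, hpnd, hps⟩ := hl rp (by simp)
    have h1 : (PySem.Dict.mk rounds).get? (PySem.Int.toStr (pvIK rp.1)) = some rp.2 := by
      have : (rp.1, rp.2) ∈ rounds := by simpa using hrmem
      exact lookup_canon rounds rp.1 rp.2 this hrnd hrc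
    have hkeys : (PySem.Dict.mk rp.2).keys.map pvIK = rp.2.map (fun ps => pvIK ps.1) := by
      rw [PySem.Dict.keys_mk, List.map_map]; rfl
    have hndint : (rp.2.map (fun ps => pvIK ps.1)).Nodup := by
      have := nodup_map_pvIK rp.2 Prod.fst hpnd (fun x hx => (hps x hx).1)
      simpa using this
    have hsortedmap : PySem.List.sorted (rp.2.map (fun ps => pvIK ps.1)) (fun x => x) false =
        (PySem.List.sorted rp.2 (fun ps => pvIK ps.1) false).map (fun ps => pvIK ps.1) := by
      have := sorted_map_id rp.2 (fun ps => pvIK ps.1) (by simpa using hndint)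
      simpa using this
    have hinner : check_draft_inner rounds (pvIK rp.1)
        ((PySem.List.sorted rp.2 (fun ps => pvIK ps.1) false).map (fun ps => pvIK ps.1)) =
        pvPart (pvBlock rp) := by
      apply inner_go rounds rp _ hrnd hrmem hrc hpnd
      intro ps hps'
      have hm : ps ∈ rp.2 := (PySem.List.mem_sorted _ _ _ _).mp hps'
      exact ⟨hm, hps ps hm⟩
    have hg : ∀ e ∈ pvBlock rp, pvGoodSlot e.2.2 := by
      intro e he
      simp only [pvBlock, List.mem_map] at he
      obtain ⟨ps, hps', rfl⟩ := he
      exact (hps ps ((PySem.List.mem_sorted _ _ _ _).mp hps')).2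
    simp only [List.map_cons, check_draft_outer, h1, hkeys, hsortedmap, hinner,
      List.flatMap_cons]
    rw [pvPart_append _ _ hg]
    cases hpv : pvPart (pvBlock rp) with
    | some res => simp [Option.or]
    | none =>
      simp only [Option.or]
      exact ih (fun rp' h => hl rp' (List.mem_cons_of_mem _ h))

-- ===== VERDICT (by name: the statement is the Claim_ definition above) =====
theorem check_draft_spec : Claim_equal_check_draft := by
  intro gn dt _ hpre
  unfold Spec_check_draft check_draft check_draft_alt
  by_cases hdt : dt = []
  · simp [hdt]
  · obtain ⟨hsome, hgood⟩ := hpre hdt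
    obtain ⟨rounds, hr⟩ := Option.isSome_iff_exists.mp hsome
    rw [hr] at hgood
    simp only [Option.getD_some] at hgood
    obtain ⟨hrnd, hall⟩ := hgood
    simp only [if_neg hdt, hr]
    -- A side
    have hkeys : (PySem.Dict.mk rounds).keys.map pvIK = rounds.map (fun rp => pvIK rp.1) := by
      rw [PySem.Dict.keys_mk, List.map_map]; rfl
    have hndint : (rounds.map (fun rp => pvIK rp.1)).Nodup := by
      have := nodup_map_pvIK rounds Prod.fst hrnd (fun x hx => (hall x hx).1)
      simpa using this
    have hsortedmap : PySem.List.sorted (rounds.map (fun rp => pvIK rp.1)) (fun x => x) false =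
        (PySem.List.sorted rounds (fun rp => pvIK rp.1) false).map (fun rp => pvIK rp.1) := by
      have := sorted_map_id rounds (fun rp => pvIK rp.1) (by simpa using hndint)
      simpa using this
    have hA : check_draft_outer rounds
        (PySem.List.sorted ((PySem.Dict.mk rounds).keys.map pvIK) (fun x => x) false) =
        (pvPart ((PySem.List.sorted rounds (fun rp => pvIK rp.1) false).flatMap pvBlock)).or
          (some ("1", "1", "player", "finished")) := by
      rw [hkeys, hsortedmap]
      apply outer_go
      · exact hrnd
      · intro rp hrp
        have hm : rp ∈ rounds := (PySem.List.mem_sorted _ _ _ _).mp hrp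
        exact ⟨hm, hall rp hm⟩
    -- B side
    have hB : PySem.List.sorted2
        (rounds.flatMap (fun rp => rp.2.map (fun ps => (pvIK rp.1, pvIK ps.1, rp.1, ps.1, ps.2))))
        (fun t => t.1) (fun t => t.2.1) false =
        ((PySem.List.sorted rounds (fun rp => pvIK rp.1) false).flatMap pvBlock).map pvAdd := by
      apply sorted2_eq_of_pvLex
      · -- permutation
        rw [List.map_flatMap]
        refine List.Perm.flatMap (PySem.List.sorted_perm rounds _ false) ?_
        intro rp _
        simp only [pvBlock, List.map_map]
        have : ((PySem.List.sorted rp.2 (fun ps => pvIK ps.1) false).map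
            (pvAdd ∘ fun ps => (rp.1, ps.1, ps.2))).Perm
            (rp.2.map (pvAdd ∘ fun ps => (rp.1, ps.1, ps.2))) :=
          (PySem.List.sorted_perm rp.2 _ false).map _
        simpa [pvAdd, Function.comp] using this
      · -- pairwise pvLex
        rw [List.map_flatMap, List.pairwise_flatMap]
        constructor
        · intro rp hrp
          have hm : rp ∈ rounds := (PySem.List.mem_sorted _ _ _ _).mp hrp
          obtain ⟨_, hpnd, hps⟩ := hall rp hm
          have hndint2 : ((PySem.List.sorted rp.2 (fun ps => pvIK ps.1) false).map
              (fun ps => pvIK ps.1)).Pairwise (· < ·) := by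
            apply pairwise_lt_of_le_nodup (PySem.List.sorted_map_key_pairwise rp.2 _)
            refine ((PySem.List.sorted_perm rp.2 _ false).map _).nodup_iff.mpr ?_
            have := nodup_map_pvIK rp.2 Prod.fst hpnd (fun x hx => (hps x hx).1)
            simpa using this
          simp only [pvBlock, List.map_map, List.pairwise_map]
          rw [List.pairwise_map] at hndint2
          refine hndint2.imp ?_
          intro a b hab
          simp [pvLex, pvAdd, hab]
        · have houter : ((PySem.List.sorted rounds (fun rp => pvIK rp.1) false).map
              (fun rp => pvIK rp.1)).Pairwise (· < ·) := by
            apply pairwise_lt_of_le_nodup (PySem.List.sorted_map_key_pairwise rounds _)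
            exact ((PySem.List.sorted_perm rounds _ false).map _).nodup_iff.mpr (by simpa using hndint)
          rw [List.pairwise_map] at houter
          refine houter.imp ?_
          intro a b hab x hx y hy
          have hx1 : x.1 = pvIK a.1 := by
            simp only [pvBlock, List.map_map, List.mem_map] at hx
            obtain ⟨ps, _, rfl⟩ := hx
            rfl
          have hy1 : y.1 = pvIK b.1 := by
            simp only [pvBlock, List.map_map, List.mem_map] at hy
            obtain ⟨ps, _, rfl⟩ := hy
            rfl
          simp [pvLex, hx1, hy1, hab]
    have hgall : ∀ e ∈ (PySem.List.sorted rounds (fun rp => pvIK rp.1) false).flatMap pvBlock,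
        pvGoodSlot e.2.2 := by
      intro e he
      rw [List.mem_flatMap] at he
      obtain ⟨rp, hrp, he⟩ := he
      simp only [pvBlock, List.mem_map] at he
      obtain ⟨ps, hps', rfl⟩ := he
      have hm : rp ∈ rounds := (PySem.List.mem_sorted _ _ _ _).mp hrp
      exact ((hall rp hm).2.2 ps ((PySem.List.mem_sorted _ _ _ _).mp hps')).2
    rw [hA, hB, altScan_map _ hgall]
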